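-- pv_equiv track=rewrite | github.com/reyazjunior/rosalind_solutions | bioinformatics_stronghold/rosalind_mrna.py | count_rna_translations
-- ===== SOURCE A (Python) =====
-- def count_rna_translations(protein):
--     codon_counts = {
--         'F': 2, 'L': 6, 'S': 6, 'Y': 2, 'C': 2, 'W': 1,
--         'P': 4, 'H': 2, 'Q': 2, 'R': 6, 'I': 3, 'M': 1,
--         'T': 4, 'N': 2, 'K': 2, 'V': 4, 'A': 4, 'D': 2,
--         'E': 2, 'G': 4, '*': 3  # * is the stop codon
--     }
--
--     MOD = 1_000_000
--     total = 1
--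
--     for aa in protein:
--         total = (total * codon_counts[aa]) % MOD
--
--     # Multiply by the number of stop codons
--     total = (total * codon_counts['*']) % MOD
--
--     return total
-- ===== SOURCE B (Python) =====
-- def count_rna_translations(protein):
--     # Every codon count is 2^a * 3^b: 1=(0,0), 2=(1,0), 3=(0,1), 4=(2,0), 6=(1,1).
--     # Accumulate the two prime exponents over the protein, then do just two
--     # modular exponentiations at the end.
--     exponents = {
--         'F': (1, 0), 'L': (1, 1), 'S': (1, 1), 'Y': (1, 0), 'C': (1, 0), 'W': (0, 0),
--         'P': (2, 0), 'H': (1, 0), 'Q': (1, 0), 'R': (1, 1), 'I': (0, 1), 'M': (0, 0),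
--         'T': (2, 0), 'N': (1, 0), 'K': (1, 0), 'V': (2, 0), 'A': (2, 0), 'D': (1, 0),
--         'E': (1, 0), 'G': (2, 0), '*': (0, 1)  # * is the stop codon (3 = 3^1)
--     }
--     MOD = 1_000_000
--     x, y = 0, 1  # the trailing stop codon contributes one factor of 3
--     for aa in protein:
--         a, b = exponents[aa]
--         x += a
--         y += b
--     return pow(2, x, MOD) * pow(3, y, MOD) % MOD
-- ===== Notes on version B (the rewrite author's own statement) =====
-- stated objective: alternative
-- what changed: B exploits that every codon count is 2^a*3^b: it accumulates the two prime exponents over the protein and finishes with two modular exponentiations, instead of one table multiply-and-reduce per character.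
import Mathlib
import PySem

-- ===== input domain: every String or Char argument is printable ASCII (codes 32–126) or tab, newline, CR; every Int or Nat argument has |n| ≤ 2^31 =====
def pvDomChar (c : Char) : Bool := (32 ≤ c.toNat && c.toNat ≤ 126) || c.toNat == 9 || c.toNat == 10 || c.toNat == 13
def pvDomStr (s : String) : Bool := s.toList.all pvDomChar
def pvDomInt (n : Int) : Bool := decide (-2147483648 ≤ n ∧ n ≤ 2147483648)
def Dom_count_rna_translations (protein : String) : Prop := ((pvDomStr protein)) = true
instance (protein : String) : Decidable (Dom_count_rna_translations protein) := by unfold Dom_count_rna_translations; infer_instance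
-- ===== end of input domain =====

-- B factors every codon count as 2^a·3^b, sums the two prime exponents over the protein and
-- finishes with two modular exponentiations (objective: alternative).

-- ===== PORT A =====
def pvCodonCounts : PySem.Dict Char Int :=
  PySem.Dict.ofList
    [('F', 2), ('L', 6), ('S', 6), ('Y', 2), ('C', 2), ('W', 1),
     ('P', 4), ('H', 2), ('Q', 2), ('R', 6), ('I', 3), ('M', 1),
     ('T', 4), ('N', 2), ('K', 2), ('V', 4), ('A', 4), ('D', 2),
     ('E', 2), ('G', 4), ('*', 3)]

-- codon_counts[aa] is ported as getD _ 0: Pre_ admits exactly the inputs where every lookup hits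
def count_rna_translations (protein : String) : Int :=
  let total : Int :=
    protein.toList.foldl
      (fun total aa => PySem.Int.mod (total * pvCodonCounts.getD aa 0) 1000000) 1
  PySem.Int.mod (total * pvCodonCounts.getD '*' 0) 1000000

-- ===== PORT B =====
def pvExponents : PySem.Dict Char (Int × Int) :=
  PySem.Dict.ofList
    [('F', (1, 0)), ('L', (1, 1)), ('S', (1, 1)), ('Y', (1, 0)), ('C', (1, 0)), ('W', (0, 0)),
     ('P', (2, 0)), ('H', (1, 0)), ('Q', (1, 0)), ('R', (1, 1)), ('I', (0, 1)), ('M', (0, 0)),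
     ('T', (2, 0)), ('N', (1, 0)), ('K', (1, 0)), ('V', (2, 0)), ('A', (2, 0)), ('D', (1, 0)),
     ('E', (1, 0)), ('G', (2, 0)), ('*', (0, 1))]

-- exponents[aa] is ported as getD _ (0,0): Pre_ admits exactly the inputs where every lookup hits
def count_rna_translations_alt (protein : String) : Int :=
  let xy : Int × Int :=
    protein.toList.foldl
      (fun xy aa =>
        let ab := pvExponents.getD aa (0, 0)
        (xy.1 + ab.1, xy.2 + ab.2)) (0, 1)
  PySem.Int.mod (PySem.Int.powMod 2 xy.1.toNat 1000000 * PySem.Int.powMod 3 xy.2.toNat 1000000) 1000000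

-- ===== PRECONDITION & SPEC =====
-- Pre_ excludes exactly the inputs on which Python A raises KeyError: a character that is
-- not one of the 20 amino-acid letters or the stop symbol.
def Pre_count_rna_translations (protein : String) : Prop :=
  (protein.toList.all (fun c =>
    ['F', 'L', 'S', 'Y', 'C', 'W', 'P', 'H', 'Q', 'R', 'I', 'M',
     'T', 'N', 'K', 'V', 'A', 'D', 'E', 'G', '*'].contains c)) = true
instance (protein : String) : Decidable (Pre_count_rna_translations protein) := by
  unfold Pre_count_rna_translations; infer_instance

def pvWitness_count_rna_translations : String := "MVFA*"

def Spec_count_rna_translations (protein : String) (out : Int) : Prop := out = count_rna_translations_alt protein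
instance (protein : String) (out : Int) : Decidable (Spec_count_rna_translations protein out) := by unfold Spec_count_rna_translations; infer_instance

-- ===== CLAIM =====
def Claim_equal_count_rna_translations : Prop := ∀ (protein : String), Dom_count_rna_translations protein → Pre_count_rna_translations protein → Spec_count_rna_translations protein (count_rna_translations protein)

-- ===== LEMMAS AND PROOFS =====

-- proof-side abbreviations for the two prime exponents of a character's codon count
def pvE2 (c : Char) : Int := (pvExponents.getD c (0, 0)).1
def pvE3 (c : Char) : Int := (pvExponents.getD c (0, 0)).2

-- a multiply-then-reduce fold, taken mod M, is the plain product mod M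
lemma pv_foldl_mulmod (f : Char → Int) (l : List Char) (t : Int) :
    (l.foldl (fun a c => (a * f c) % 1000000) t) % 1000000
      = (t * (l.map f).prod) % 1000000 := by
  induction l generalizing t with
  | nil => simp
  | cons c l ih =>
      simp only [List.foldl_cons, List.map_cons, List.prod_cons]
      rw [ih, Int.mul_emod, Int.emod_emod_of_dvd _ dvd_rfl, ← Int.mul_emod, mul_assoc]

-- the pair fold of B sums the two exponent maps componentwise
lemma pv_foldl_pair (l : List Char) (x y : Int) :
    l.foldl (fun xy aa =>
        let ab := pvExponents.getD aa (0, 0)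
        (xy.1 + ab.1, xy.2 + ab.2)) (x, y)
      = (x + (l.map pvE2).sum, y + (l.map pvE3).sum) := by
  induction l generalizing x y with
  | nil => simp
  | cons c l ih =>
      simp only [List.foldl_cons, List.map_cons, List.sum_cons, ih, pvE2, pvE3]
      exact Prod.ext (by ring) (by ring)

-- per character of the allowed alphabet: exponents are nonnegative and factor the codon count
lemma pv_char_factor (c : Char)
    (hc : c ∈ ['F', 'L', 'S', 'Y', 'C', 'W', 'P', 'H', 'Q', 'R', 'I', 'M',
                'T', 'N', 'K', 'V', 'A', 'D', 'E', 'G', '*']) :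
    0 ≤ pvE2 c ∧ 0 ≤ pvE3 c ∧
      pvCodonCounts.getD c 0 = 2 ^ (pvE2 c).toNat * 3 ^ (pvE3 c).toNat := by
  fin_cases hc <;> decide

-- product of the codon counts = 2^(sum of 2-exponents) · 3^(sum of 3-exponents)
lemma pv_prod_factor (l : List Char)
    (hl : ∀ c ∈ l, c ∈ ['F', 'L', 'S', 'Y', 'C', 'W', 'P', 'H', 'Q', 'R', 'I', 'M',
                        'T', 'N', 'K', 'V', 'A', 'D', 'E', 'G', '*']) :
    0 ≤ (l.map pvE2).sum ∧ 0 ≤ (l.map pvE3).sum ∧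
      (l.map (fun c => pvCodonCounts.getD c 0)).prod
        = 2 ^ ((l.map pvE2).sum).toNat * 3 ^ ((l.map pvE3).sum).toNat := by
  induction l with
  | nil => simp
  | cons c l ih =>
      obtain ⟨h2, h3, hf⟩ := pv_char_factor c (hl c List.mem_cons_self)
      obtain ⟨s2, s3, hp⟩ := ih (fun a ha => hl a (List.mem_cons_of_mem _ ha))
      refine ⟨add_nonneg h2 s2, add_nonneg h3 s3, ?_⟩
      simp only [List.map_cons, List.sum_cons, List.prod_cons, hp, hf,
        Int.toNat_add h2 s2, Int.toNat_add h3 s3, pow_add]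
      ring

-- ===== VERDICT (by name: the statement is the Claim_ definition above) =====
theorem count_rna_translations_spec : Claim_equal_count_rna_translations := by
  intro protein _ hpre
  unfold Spec_count_rna_translations count_rna_translations count_rna_translations_alt
  have hM : (0 : Int) < 1000000 := by norm_num
  simp only [PySem.Int.powMod, PySem.Int.mod_eq_emod_of_pos hM]
  set l := protein.toList with hl
  have hmem : ∀ c ∈ l, c ∈ ['F', 'L', 'S', 'Y', 'C', 'W', 'P', 'H', 'Q', 'R', 'I', 'M',
      'T', 'N', 'K', 'V', 'A', 'D', 'E', 'G', '*'] := by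
    intro c hc
    have := List.all_eq_true.mp hpre c hc
    simpa using this
  obtain ⟨s2, s3, hp⟩ := pv_prod_factor l hmem
  rw [pv_foldl_pair l 0 1]
  simp only [zero_add]
  rw [Int.mul_emod ((2:Int) ^ _ % 1000000), Int.emod_emod_of_dvd _ dvd_rfl,
    Int.emod_emod_of_dvd _ dvd_rfl, ← Int.mul_emod]
  rw [Int.mul_emod (l.foldl _ 1), pv_foldl_mulmod (fun c => pvCodonCounts.getD c 0) l 1,
    ← Int.mul_emod, one_mul, hp]
  have hy : ((1 : Int) + (l.map pvE3).sum).toNat = 1 + ((l.map pvE3).sum).toNat := by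
    omega
  rw [hy, pow_add]
  have hstar : pvCodonCounts.getD '*' 0 = 3 := by decide
  rw [hstar]
  ring_nf
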